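-- pv_equiv track=rewrite | github.com/wahlp/advent-of-code-2024 | day22/part2.py | simulate_prices
-- ===== SOURCE A (Python) =====
-- def process(secret):
--     secret = ((secret * 64) ^ secret) % 16777216
--     secret = ((secret // 32) ^ secret) % 16777216
--     secret = ((secret * 2048) ^ secret) % 16777216
--     return secret
--
-- def simulate_prices(num: int, steps: int):
--     prices = []
--     price_changes = []
--     for i in range(steps):
--         prices.append(num % 10)
--         if i > 0:
--             price_changes.append(prices[-1] - prices[-2])
--         num = process(num)
--     return prices, price_changes
-- ===== SOURCE B (Python) =====
-- def process(secret):
--     secret = ((secret * 64) ^ secret) % 16777216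
--     secret = ((secret // 32) ^ secret) % 16777216
--     secret = ((secret * 2048) ^ secret) % 16777216
--     return secret
--
-- def simulate_prices(num: int, steps: int):
--     # Divide-and-conquer: go(secret, n) returns the n prices starting at `secret`
--     # together with the secret reached after n steps, splitting n in half.
--     def go(secret, n):
--         if n <= 0:
--             return [], secret
--         if n == 1:
--             return [secret % 10], process(secret)
--         h = n // 2
--         left, mid = go(secret, h)
--         right, end = go(mid, n - h)
--         return left + right, end
--     prices, _ = go(num, steps)
--     changes = [prices[i + 1] - prices[i] for i in range(len(prices) - 1)]
--     return prices, changes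
-- ===== Notes on version B (the rewrite author's own statement) =====
-- stated objective: alternative
-- what changed: Replaces A's single interleaved index loop (with the i>0 guard and negative indexing) by a divide-and-conquer recursion that splits the step count in half, each call returning its block of prices plus the secret it ends on, with the changes derived afterwards by an index comprehension over the finished price list.
import Mathlib
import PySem

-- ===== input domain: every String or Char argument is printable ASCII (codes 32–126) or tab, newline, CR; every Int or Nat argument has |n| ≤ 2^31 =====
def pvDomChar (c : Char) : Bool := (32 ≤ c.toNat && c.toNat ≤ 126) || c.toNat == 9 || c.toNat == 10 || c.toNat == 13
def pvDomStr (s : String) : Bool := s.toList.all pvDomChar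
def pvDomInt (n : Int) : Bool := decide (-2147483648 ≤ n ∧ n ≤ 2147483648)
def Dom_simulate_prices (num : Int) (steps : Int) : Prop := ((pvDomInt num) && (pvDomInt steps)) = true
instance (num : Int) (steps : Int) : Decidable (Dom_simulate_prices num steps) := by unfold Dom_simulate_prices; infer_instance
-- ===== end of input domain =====

-- B replaces A's interleaved index loop by a divide-and-conquer recursion on the step count
-- (each half returns its price block plus the secret it ends on), deriving the changes afterwards
-- from the finished price list (objective: alternative; same value, different algorithm shape).

-- ===== PORT A =====
def process (secret : Int) : Int :=
  let s1 := PySem.Int.mod (PySem.Int.bxor (secret * 64) secret) 16777216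
  let s2 := PySem.Int.mod (PySem.Int.bxor (PySem.Int.floordiv s1 32) s1) 16777216
  PySem.Int.mod (PySem.Int.bxor (s2 * 2048) s2) 16777216

-- loop body of A's for-loop: state is (prices, price_changes, num).
-- prices[-1]/prices[-2] are read with default 0: on A's executed path the i>0 guard
-- guarantees both indices are in range, so the default is never used.
def aStep (st : List Int × List Int × Int) (i : Int) : List Int × List Int × Int :=
  let prices := st.1 ++ [PySem.Int.mod st.2.2 10]
  let changes :=
    if 0 < i then
      st.2.1 ++ [PySem.List.pyGetD prices (-1) 0 - PySem.List.pyGetD prices (-2) 0]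
    else st.2.1
  (prices, changes, process st.2.2)

def simulate_prices (num : Int) (steps : Int) : List Int × List Int :=
  let st := (PySem.List.pyRange 0 steps 1).foldl aStep ([], [], num)
  (st.1, st.2.1)

-- ===== PORT B =====
-- Source B keeps `process` textually identical to A's, so its port reuses the helper above.
-- go(secret, n): the n prices starting at `secret` plus the secret after n steps, by halving n.
def bGo (secret : Int) (n : Nat) : List Int × Int :=
  if n = 0 then ([], secret)
  else if n = 1 then ([PySem.Int.mod secret 10], process secret)
  else
    let h := n / 2
    let l := bGo secret h
    let r := bGo l.2 (n - h)
    (l.1 ++ r.1, r.2)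
decreasing_by all_goals omega

def simulate_prices_alt (num : Int) (steps : Int) : List Int × List Int :=
  let prices := (bGo num steps.toNat).1
  let changes := (PySem.List.pyRange 0 ((prices.length : Int) - 1) 1).map
      (fun i => PySem.List.pyGetD prices (i + 1) 0 - PySem.List.pyGetD prices i 0)
  (prices, changes)

-- ===== PRECONDITION & SPEC =====
def Spec_simulate_prices (num : Int) (steps : Int) (out : List Int × List Int) : Prop := out = simulate_prices_alt num steps
instance (num : Int) (steps : Int) (out : List Int × List Int) : Decidable (Spec_simulate_prices num steps out) := by unfold Spec_simulate_prices; infer_instance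

-- ===== CLAIM (what is proved, stated in full; the proofs are below) =====
def Claim_equal_simulate_prices : Prop := ∀ (num : Int) (steps : Int), Dom_simulate_prices num steps → Spec_simulate_prices num steps (simulate_prices num steps)

-- ===== LEMMAS AND PROOFS =====

-- reference linear price sequence, used only by the proofs
def refP (num : Int) : Nat → List Int
  | 0 => []
  | n + 1 => PySem.Int.mod num 10 :: refP (process num) n

-- successive differences of (l :: ys)
def diffs (l : Int) : List Int → List Int
  | [] => []
  | y :: ys => (y - l) :: diffs y ys

lemma refP_add (num : Int) (a b : Nat) :
    refP num (a + b) = refP num a ++ refP (Nat.iterate process a num) b := by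
  induction a generalizing num with
  | zero => simp [refP]
  | succ a ih =>
    rw [Nat.succ_add]
    simp only [refP, List.cons_append]
    rw [ih (process num), Function.iterate_succ_apply]

lemma bGo_eq (secret : Int) (n : Nat) :
    bGo secret n = (refP secret n, Nat.iterate process n secret) := by
  induction n using Nat.strong_induction_on generalizing secret with
  | _ n ih =>
    match n with
    | 0 => simp [bGo, refP]
    | 1 => simp [bGo, refP]
    | n + 2 =>
      rw [bGo]
      simp only [show ¬(n + 2 = 0) by omega, show ¬(n + 2 = 1) by omega, if_false]
      rw [ih ((n + 2) / 2) (by omega) secret,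
          ih ((n + 2) - (n + 2) / 2) (by omega)]
      have hsplit : n + 2 = (n + 2) / 2 + ((n + 2) - (n + 2) / 2) := by omega
      simp only [Prod.mk.injEq]
      constructor
      · conv_rhs => rw [hsplit, refP_add]
      · conv_rhs => rw [hsplit]
        rw [Nat.add_comm ((n+2)/2), Function.iterate_add_apply]

lemma pyGetD_neg_two_append (p : List Int) (m : Int) (hp : p ≠ []) :
    PySem.List.pyGetD (p ++ [m]) (-2) 0 = p.getLast hp := by
  have hp1 : 0 < p.length := List.length_pos_iff.mpr hp
  have hl : 2 ≤ (p ++ [m]).length := by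
    simp only [List.length_append, List.length_singleton]; omega
  rw [PySem.List.pyGetD_neg_ofNat (p ++ [m]) 2 0 (by omega) hl]
  have hi : (p ++ [m]).length - 2 = p.length - 1 := by
    simp only [List.length_append, List.length_singleton]; omega
  simp only [hi]
  rw [List.getElem_append_left (by omega), List.getLast_eq_getElem]

lemma main_loop (n : Nat) (a : Int) (ha : 1 ≤ a) (p c : List Int) (x : Int) (hp : p ≠ []) :
    (PySem.List.pyRange a (a + n) 1).foldl aStep (p, c, x) =
      (p ++ refP x n, c ++ diffs (p.getLast hp) (refP x n), Nat.iterate process n x) := by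
  induction n generalizing a p c x with
  | zero =>
    rw [PySem.List.pyRange_one_eq_nil (by omega)]
    simp [diffs, refP]
  | succ n ih =>
    rw [show a + (n + 1 : Nat) = a + 1 + n by push_cast; ring,
        PySem.List.pyRange_one_cons (by omega)]
    simp only [List.foldl_cons]
    have hstep : aStep (p, c, x) a =
        (p ++ [PySem.Int.mod x 10],
         c ++ [PySem.Int.mod x 10 - p.getLast hp], process x) := by
      simp only [aStep, if_pos (by omega : (0:Int) < a)]
      rw [PySem.List.pyGetD_neg_one_append_singleton, pyGetD_neg_two_append p _ hp]
    rw [hstep, ih (a + 1) (by omega) _ _ (process x) (by simp)]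
    rw [Function.iterate_succ_apply]
    simp [refP, diffs]

-- B's index comprehension over the finished list computes the successive differences
lemma pyGetD_cons_succ (x : Int) (xs : List Int) (i d : Int)
    (h0 : 0 ≤ i) (h : i < (xs.length : Int)) :
    PySem.List.pyGetD (x :: xs) (i + 1) d = PySem.List.pyGetD xs i d := by
  rw [PySem.List.pyGetD_eq_getElem (x :: xs) d (by omega)
        (by push_cast [List.length_cons]; omega),
      PySem.List.pyGetD_eq_getElem xs d h0 h]
  have hi : (i + 1).toNat = i.toNat + 1 := by omega
  simp [hi]

lemma changes_eq (l : Int) (ys : List Int) :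
    (PySem.List.pyRange 0 (((l :: ys).length : Int) - 1) 1).map
      (fun i => PySem.List.pyGetD (l :: ys) (i + 1) 0 - PySem.List.pyGetD (l :: ys) i 0)
    = diffs l ys := by
  induction ys generalizing l with
  | nil => simp [diffs, PySem.List.pyRange_one_eq_nil]
  | cons y ys ih =>
    have hlen : (((l :: y :: ys).length : Int) - 1) = ((y :: ys).length : Int) := by
      push_cast [List.length_cons]; ring
    rw [hlen, PySem.List.pyRange_one_cons
      (by exact_mod_cast Nat.pos_of_ne_zero (by simp) : (0:Int) < ((y :: ys).length : Int))]
    simp only [List.map_cons]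
    have hshift : (PySem.List.pyRange (0 + 1) ((y :: ys).length : Int) 1).map
        (fun i => PySem.List.pyGetD (l :: y :: ys) (i + 1) 0 - PySem.List.pyGetD (l :: y :: ys) i 0)
        = (PySem.List.pyRange 0 (((y :: ys).length : Int) - 1) 1).map
        (fun i => PySem.List.pyGetD (y :: ys) (i + 1) 0 - PySem.List.pyGetD (y :: ys) i 0) := by
      have h1 : (PySem.List.pyRange (0 + 1) ((y :: ys).length : Int) 1)
          = (PySem.List.pyRange 0 (((y :: ys).length : Int) - 1) 1).map (fun k => k + 1) := by
        rw [PySem.List.pyRange_one, PySem.List.pyRange_one, List.map_map]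
        have he : (((y :: ys).length : Int) - (0 + 1)).toNat
            = (((y :: ys).length : Int) - 1 - 0).toNat := by omega
        rw [he]
        apply List.map_congr_left
        intro k _; simp [Function.comp]; ring
      rw [h1, List.map_map]
      apply List.map_congr_left
      intro k hk
      have hk0 : 0 ≤ k := (PySem.List.mem_pyRange_one.mp hk).1
      have hk1 : k < (((y :: ys).length : Int) - 1) := (PySem.List.mem_pyRange_one.mp hk).2
      have hkl : k < ((ys.length : Int)) := by
        simp only [List.length_cons] at hk1; push_cast at hk1; omega
      simp only [Function.comp]
      rw [show k + 1 + 1 = (k + 1) + 1 by ring]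
      rw [pyGetD_cons_succ l (y :: ys) (k + 1) 0 (by omega)
            (by simp only [List.length_cons]; push_cast; omega),
          pyGetD_cons_succ l (y :: ys) k 0 hk0
            (by simp only [List.length_cons]; push_cast; omega)]
    rw [hshift, ih y]
    simp [diffs, PySem.List.pyGetD]

lemma sim_eq (num : Int) (steps : Int) :
    simulate_prices num steps = simulate_prices_alt num steps := by
  by_cases h : steps ≤ 0
  · have hz : steps.toNat = 0 := by omega
    unfold simulate_prices simulate_prices_alt
    rw [PySem.List.pyRange_one_eq_nil (by omega), hz]
    simp [bGo, PySem.List.pyRange_one_eq_nil]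
  · have h' : 0 < steps := by omega
    have hAlt : simulate_prices_alt num steps =
        (PySem.Int.mod num 10 :: refP (process num) (steps - 1).toNat,
         diffs (PySem.Int.mod num 10) (refP (process num) (steps - 1).toNat)) := by
      unfold simulate_prices_alt
      rw [bGo_eq]
      have htn : steps.toNat = (steps - 1).toNat + 1 := by omega
      rw [htn]
      rw [show refP num ((steps - 1).toNat + 1)
          = PySem.Int.mod num 10 :: refP (process num) (steps - 1).toNat from rfl]
      show (PySem.Int.mod num 10 :: refP (process num) (steps - 1).toNat,
          (PySem.List.pyRange 0
            (((PySem.Int.mod num 10 :: refP (process num) (steps - 1).toNat).length : Int) - 1) 1).map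
            (fun i => PySem.List.pyGetD (PySem.Int.mod num 10 :: refP (process num) (steps - 1).toNat) (i + 1) 0
              - PySem.List.pyGetD (PySem.Int.mod num 10 :: refP (process num) (steps - 1).toNat) i 0)) = _
      rw [changes_eq]
    rw [hAlt]
    unfold simulate_prices
    rw [PySem.List.pyRange_one_cons h']
    simp only [List.foldl_cons]
    have hstep0 : aStep ([], [], num) 0 =
        ([PySem.Int.mod num 10], [], process num) := by
      simp [aStep]
    rw [hstep0, show (0:Int) + 1 = 1 by ring,
        show steps = 1 + ((steps - 1).toNat : Int) by omega,
        main_loop ((steps - 1).toNat) 1 (by omega) _ _ (process num) (by simp)]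
    simp

-- ===== VERDICT (by name: the statement is the Claim_ definition above) =====
theorem simulate_prices_spec : Claim_equal_simulate_prices := by
  intro num steps _
  unfold Spec_simulate_prices
  exact sim_eq num steps
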